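-- pv_equiv track=rewrite | github.com/ivanovich1729/ciclo1 | reto4.py | profesor_check
-- ===== SOURCE A (Python) =====
-- def profesor_check(examen, profesor, lst):
--     '''
--     Funcion para verificar la cantidad de copias encontradas por el profesor.
--     Parameters
--     ----------
--     profesor : Type (int)
--       es un número entero que representa los exámenes recordados.
--     lst = Type list
--       es la lista que contine los valores de los exámenes.
--     examen : Type (int)
--       es la cantidad total de examenes.
--     Returns
--     -------
--     count : Type (int)
--       Regresa el numero de examenes identificados por el profesor.
--     '''
--     count = 0
--     # Iterar hasta el penúltimo examen.
--     for i in range(0, len(lst) - 1):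
--         # Verificar que los exámenes restantes sean más de los recordados.
--         if len(lst) - i > profesor:
--             num = profesor
--             # Comparar el número de exámenes con el número de copiados.
--             # Si el total - 1 examenes es igual a los copiados, terminar.
--             if count == (examen - 1):
--                 break
--             else:
--                 # Comparar los exámenes con los recordados.
--                 while num > 0:
--                     if lst[i] == lst[i + num]:
--                         count += 1
--                     num -= 1
--         # Restar recordados si los examenes son menos.
--         else:
--             profesor -= 1
--     return count
-- ===== SOURCE B (Python) =====
-- def profesor_check(examen, profesor, lst):
--     # Sliding-window frequency map: for each index i (while more than `profesor`
--     # exams remain), add the number of occurrences of lst[i] in the next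
--     # `profesor` positions, with the same per-index early exit as the original.
--     n = len(lst)
--     if profesor <= 0:
--         return 0
--     limit = min(n - 1, n - profesor)
--     if limit <= 0:
--         return 0
--     freq = {}
--     for x in lst[1:1 + profesor]:
--         freq[x] = freq.get(x, 0) + 1
--     count = 0
--     for i in range(limit):
--         if count == examen - 1:
--             break
--         count += freq.get(lst[i], 0)
--         if i + 1 < limit:
--             freq[lst[i + 1]] -= 1
--             freq[lst[i + profesor + 1]] = freq.get(lst[i + profesor + 1], 0) + 1
--     return count
-- ===== Notes on version B (the rewrite author's own statement) =====
-- stated objective: faster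
-- what changed: A rescans the next `profesor` exams for every index with a decrementing inner while-loop; B precomputes the loop bound min(n-1, n-profesor) in closed form and maintains a sliding-window frequency dictionary, so each index costs O(1) instead of O(profesor), keeping the same per-index early exit.
import Mathlib
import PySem

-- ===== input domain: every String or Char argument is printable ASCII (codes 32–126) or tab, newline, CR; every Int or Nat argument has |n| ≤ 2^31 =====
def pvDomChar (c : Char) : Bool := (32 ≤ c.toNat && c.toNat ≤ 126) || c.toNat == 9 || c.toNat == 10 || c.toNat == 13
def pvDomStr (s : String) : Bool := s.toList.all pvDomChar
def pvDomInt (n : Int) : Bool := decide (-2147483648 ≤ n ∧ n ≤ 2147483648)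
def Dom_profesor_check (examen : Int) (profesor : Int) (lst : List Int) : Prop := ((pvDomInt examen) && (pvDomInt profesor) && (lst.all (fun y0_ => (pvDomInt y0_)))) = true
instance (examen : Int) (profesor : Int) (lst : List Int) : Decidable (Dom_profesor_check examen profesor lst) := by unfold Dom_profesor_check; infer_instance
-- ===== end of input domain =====

-- B replaces A's per-index inner rescan of the next `profesor` exams by a sliding-window
-- value-frequency dictionary (O(n+profesor) instead of O(n*profesor)); measured faster.

-- ===== PORT A =====
-- inner `while num > 0:` loop of A: fuel is num (as a Nat; num = profesor, skipped when ≤ 0);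
-- indices are in range whenever Python reaches the loop, so pyGetD's default 0 is never used.
def pvWhileA (lst : List Int) (i : Int) (count : Int) : Nat → Int
  | 0 => count
  | m + 1 =>
      pvWhileA lst i
        (if PySem.List.pyGetD lst i 0 = PySem.List.pyGetD lst (i + ((m : Int) + 1)) 0
         then count + 1 else count) m

-- loop body of A; state = (count, profesor, broken); `num = profesor` is inlined into pvWhileA's fuel
def pvStepA (examen : Int) (lst : List Int) (s : Int × Int × Bool) (i : Int) : Int × Int × Bool :=
  if s.2.2 then s
  else if (lst.length : Int) - i > s.2.1 then
    if s.1 = examen - 1 then (s.1, s.2.1, true)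
    else (pvWhileA lst i s.1 s.2.1.toNat, s.2.1, false)
  else (s.1, s.2.1 - 1, s.2.2)

def profesor_check (examen : Int) (profesor : Int) (lst : List Int) : Int :=
  ((PySem.List.pyRange 0 ((lst.length : Int) - 1) 1).foldl (pvStepA examen lst)
    (0, profesor, false)).1

-- ===== PORT B =====
-- loop body of B; state = (count, freq, broken). `freq[lst[i+1]] -= 1` is ported with
-- getD's default 0, exact because that key is always in the window when the line runs.
def pvStepB (examen profesor limit : Int) (lst : List Int)
    (s : Int × PySem.Dict Int Int × Bool) (i : Int) : Int × PySem.Dict Int Int × Bool :=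
  if s.2.2 then s
  else if s.1 = examen - 1 then (s.1, s.2.1, true)
  else
    let c := s.1 + s.2.1.getD (PySem.List.pyGetD lst i 0) 0
    let d :=
      if i + 1 < limit then
        let d1 := s.2.1.insert (PySem.List.pyGetD lst (i + 1) 0)
                    (s.2.1.getD (PySem.List.pyGetD lst (i + 1) 0) 0 - 1)
        d1.insert (PySem.List.pyGetD lst (i + profesor + 1) 0)
          (d1.getD (PySem.List.pyGetD lst (i + profesor + 1) 0) 0 + 1)
      else s.2.1
    (c, d, false)

def profesor_check_alt (examen : Int) (profesor : Int) (lst : List Int) : Int :=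
  let n : Int := lst.length
  if profesor ≤ 0 then 0
  else
    let limit := min (n - 1) (n - profesor)
    if limit ≤ 0 then 0
    else
      let freq0 := (PySem.List.slice lst (some 1) (some (1 + profesor))).foldl
        (fun d x => d.insert x (d.getD x 0 + 1)) PySem.Dict.empty
      ((PySem.List.pyRange 0 limit 1).foldl (pvStepB examen profesor limit lst)
        (0, freq0, false)).1

-- ===== PRECONDITION & SPEC =====
def Spec_profesor_check (examen : Int) (profesor : Int) (lst : List Int) (out : Int) : Prop := out = profesor_check_alt examen profesor lst
instance (examen : Int) (profesor : Int) (lst : List Int) (out : Int) : Decidable (Spec_profesor_check examen profesor lst out) := by unfold Spec_profesor_check; infer_instance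

-- ===== CLAIM (what is proved, stated in full; the proofs are below) =====
def Claim_equal_profesor_check : Prop := ∀ (examen : Int) (profesor : Int) (lst : List Int), Dom_profesor_check examen profesor lst → Spec_profesor_check examen profesor lst (profesor_check examen profesor lst)

-- ===== LEMMAS AND PROOFS =====

-- the common abstract loop: add the per-index match counts, breaking when count = examen-1
def pvLoop (examen : Int) : Int → List Int → Int
  | count, [] => count
  | count, m :: t => if count = examen - 1 then count else pvLoop examen (count + m) t

-- match count of index s: occurrences of lst[s] among the next P entries
def pvMC (lst : List Int) (P : Nat) (s : Nat) : Int :=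
  (((lst.drop (s + 1)).take P).count (lst.getD s 0) : Int)

-- the two fold bodies specialised to a Nat loop counter
def pvGA (examen : Int) (lst : List Int) (st : Int × Int × Bool) (k : Nat) : Int × Int × Bool :=
  pvStepA examen lst st (k : Int)

def pvGB (examen profesor limit : Int) (lst : List Int)
    (st : Int × PySem.Dict Int Int × Bool) (k : Nat) : Int × PySem.Dict Int Int × Bool :=
  pvStepB examen profesor limit lst st (k : Int)

-- once A's state is broken, it is frozen
theorem pvA_frozen (examen : Int) (lst : List Int) (l : List Nat) (c p : Int) :
    l.foldl (pvGA examen lst) (c, p, true) = (c, p, true) := by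
  induction l with
  | nil => rfl
  | cons x t ih => simpa [pvGA, pvStepA] using ih

-- once B's state is broken, it is frozen
theorem pvB_frozen (examen profesor limit : Int) (lst : List Int) (l : List Nat)
    (c : Int) (d : PySem.Dict Int Int) :
    l.foldl (pvGB examen profesor limit lst) (c, d, true) = (c, d, true) := by
  induction l with
  | nil => rfl
  | cons x t ih => simpa [pvGB, pvStepB] using ih

-- A's tail: once the remaining exams are no more than profesor, count never changes
theorem pvA_tail (examen : Int) (lst : List Int) (len s : Nat) (c p : Int) (b : Bool)
    (h : b = true ∨ (lst.length : Int) - (s : Int) ≤ p) :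
    ((List.range' s len).foldl (pvGA examen lst) (c, p, b)).1 = c := by
  induction len generalizing s p b with
  | zero => rfl
  | succ m ih =>
      rw [List.range'_succ, List.foldl_cons]
      rcases h with hb | hle
      · subst hb
        simpa [pvGA, pvStepA] using ih (s + 1) p true (Or.inl rfl)
      · have hcond : ¬ ((lst.length : Int) - (s : Int) > p) := by omega
        rcases b with _ | _
        · simp only [pvGA, pvStepA, Bool.false_eq_true, if_false, hcond]
          exact ih (s + 1) (p - 1) false (Or.inr (by push_cast at hle ⊢; omega))
        · simp only [pvGA, pvStepA, if_true]
          exact ih (s + 1) p true (Or.inl rfl)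

-- unfolding pvWhileA: it adds the number of matches of lst[i] in lst[i+1..i+f]
theorem pvWhileA_spec (lst : List Int) (i : Nat) (count : Int) (f : Nat)
    (h : i + f < lst.length) :
    pvWhileA lst (i : Int) count f
      = count + (((lst.drop (i + 1)).take f).count (lst.getD i 0) : Int) := by
  induction f generalizing count with
  | zero => simp [pvWhileA]
  | succ m ih =>
      have hi : i < lst.length := by omega
      have hidx : i + 1 + m < lst.length := by omega
      have hcast : (i : Int) + ((m : Int) + 1) = ((i + 1 + m : Nat) : Int) := by push_cast; ring
      have hgetI : PySem.List.pyGetD lst (i : Int) 0 = lst[i] := by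
        rw [PySem.List.pyGetD_natCast]; exact List.getD_eq_getElem lst 0 hi
      have hgetJ : PySem.List.pyGetD lst ((i + 1 + m : Nat) : Int) 0 = lst[i + 1 + m] := by
        rw [PySem.List.pyGetD_natCast]; exact List.getD_eq_getElem lst 0 hidx
      have hdropget : (lst.drop (i + 1))[m]? = some (lst[i + 1 + m]) := by
        rw [List.getElem?_drop]; exact List.getElem?_eq_getElem hidx
      rw [List.take_add_one, hdropget]
      simp only [pvWhileA, hcast, hgetI, hgetJ]
      rw [ih _ (by omega), List.count_append]
      rw [List.getD_eq_getElem lst 0 hi]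
      simp only [List.count_cons, List.count_nil, Option.toList_some, beq_iff_eq]
      by_cases hEq : lst[i] = lst[i + 1 + m]
      · simp only [hEq]; push_cast; ring
      · rw [if_neg hEq, if_neg (fun hc => hEq hc.symm)]; push_cast; ring

-- A's head: as long as the window fits, each step adds the match count (with the break check)
theorem pvA_head (examen : Int) (lst : List Int) (P : Nat)
    (hn : P + 1 ≤ lst.length) :
    ∀ (len s : Nat) (count : Int), s + len ≤ lst.length - P →
    (List.range' s len).foldl (pvGA examen lst) (count, (P : Int), false)
      = (pvLoop examen count ((List.range' s len).map (pvMC lst P)), (P : Int),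
          ((List.range' s len).foldl (pvGA examen lst) (count, (P : Int), false)).2.2) := by
  intro len
  induction len with
  | zero => intro s count _; rfl
  | succ m ih =>
      intro s count hs
      rw [List.range'_succ, List.foldl_cons, List.map_cons]
      have hcond : ((lst.length : Int) - (s : Int) > (P : Int)) := by
        have : s + P < lst.length := by omega
        omega
      by_cases hbr : count = examen - 1
      · simp only [pvGA, pvStepA, Bool.false_eq_true, if_false, hcond, if_true, if_pos hbr]
        rw [pvA_frozen]
        simp [pvLoop, hbr]
      · have hwin : s + P < lst.length := by omega
        simp only [pvGA, pvStepA, Bool.false_eq_true, if_false, hcond, if_true, if_neg hbr,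
          Int.toNat_natCast]
        rw [pvWhileA_spec lst s count P hwin]
        rw [ih (s + 1) _ (by omega)]
        simp only [pvLoop, if_neg hbr]
        rfl

-- the sliding-window invariant: freq holds the multiset of the P entries after index s
def pvInv (lst : List Int) (P s : Nat) (d : PySem.Dict Int Int) : Prop :=
  ∀ v : Int, d.getD v 0 = (((lst.drop (s + 1)).take P).count v : Int)

-- one slide of the window keeps the invariant
theorem pvInv_step (lst : List Int) (P s : Nat) (d : PySem.Dict Int Int)
    (hP : 1 ≤ P) (hn : s + 1 + P < lst.length) (hd : pvInv lst P s d) :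
    pvInv lst P (s + 1)
      ((d.insert (lst.getD (s + 1) 0) (d.getD (lst.getD (s + 1) 0) 0 - 1)).insert
        (lst.getD (s + 1 + P) 0)
        ((d.insert (lst.getD (s + 1) 0) (d.getD (lst.getD (s + 1) 0) 0 - 1)).getD
          (lst.getD (s + 1 + P) 0) 0 + 1)) := by
  intro v
  have hs1 : s + 1 < lst.length := by omega
  have hsP : s + 1 + P < lst.length := hn
  obtain ⟨Q, hQ⟩ : ∃ Q, P = Q + 1 := ⟨P - 1, by omega⟩
  subst hQ
  have hga : lst.getD (s + 1) 0 = lst[s + 1] := List.getD_eq_getElem lst 0 hs1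
  have hgb : lst.getD (s + 1 + (Q + 1)) 0 = lst[s + 1 + (Q + 1)] := List.getD_eq_getElem lst 0 hsP
  have hWs : (lst.drop (s + 1)).take (Q + 1) = lst[s + 1] :: ((lst.drop (s + 2)).take Q) := by
    rw [List.drop_eq_getElem_cons hs1, List.take_succ_cons]
  have hWs1 : (lst.drop (s + 1 + 1)).take (Q + 1)
      = ((lst.drop (s + 2)).take Q) ++ [lst[s + 1 + (Q + 1)]] := by
    rw [show s + 1 + 1 = s + 2 by ring, List.take_add_one, List.getElem?_drop,
      show s + 2 + Q = s + 1 + (Q + 1) by ring, List.getElem?_eq_getElem hsP]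
    rfl
  have hcnt := hd v
  have hcnta := hd lst[s + 1]
  have hcntb := hd lst[s + 1 + (Q + 1)]
  rw [hWs] at hcnt hcnta hcntb
  rw [hga, hgb, hWs1, PySem.Dict.getD_insert, PySem.Dict.getD_insert, PySem.Dict.getD_insert]
  by_cases hvy : v = lst[s + 1 + (Q + 1)]
  · subst hvy
    rw [if_pos rfl]
    by_cases hyx : lst[s + 1 + (Q + 1)] = lst[s + 1]
    · have h0 : List.count lst[s + 1] [lst[s + 1]] = 1 := by simp
      rw [if_pos hyx, hcnta, hyx, List.count_cons_self, List.count_append, h0]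
      push_cast; ring
    · have h0 : List.count lst[s + 1 + (Q + 1)] [lst[s + 1 + (Q + 1)]] = 1 := by simp
      rw [if_neg hyx, hcntb, List.count_cons_of_ne (Ne.symm hyx), List.count_append, h0]
      push_cast; ring
  · rw [if_neg hvy]
    by_cases hvx : v = lst[s + 1]
    · subst hvx
      have h0 : List.count lst[s + 1] [lst[s + 1 + (Q + 1)]] = 0 :=
        List.count_eq_zero.mpr (by simp [hvy])
      rw [if_pos rfl, hcnta, List.count_cons_self, List.count_append, h0]
      push_cast; ring
    · have h0 : List.count v [lst[s + 1 + (Q + 1)]] = 0 :=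
        List.count_eq_zero.mpr (by simp [hvy])
      rw [if_neg hvx, hcnt, List.count_cons_of_ne (Ne.symm hvx), List.count_append, h0]
      push_cast; ring

-- B's head: the fold with the frequency dictionary computes the same abstract loop
theorem pvB_head (examen profesor limit : Int) (lst : List Int) (P L : Nat)
    (hp : (P : Int) = profesor) (hlim : (L : Int) = limit)
    (hL : L = lst.length - P) (hP : 1 ≤ P) (hn : P + 1 ≤ lst.length) :
    ∀ (len s : Nat) (count : Int) (d : PySem.Dict Int Int), s + len ≤ L → pvInv lst P s d →
    ((List.range' s len).foldl (pvGB examen profesor limit lst) (count, d, false)).1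
      = pvLoop examen count ((List.range' s len).map (pvMC lst P)) := by
  intro len
  induction len with
  | zero => intro s count d _ _; rfl
  | succ m ih =>
      intro s count d hs hinv
      rw [List.range'_succ, List.foldl_cons, List.map_cons]
      by_cases hbr : count = examen - 1
      · simp only [pvGB, pvStepB, Bool.false_eq_true, if_false, if_pos hbr]
        rw [pvB_frozen]
        simp [pvLoop, hbr]
      · simp only [pvGB, pvStepB, Bool.false_eq_true, if_false, if_neg hbr]
        have hsn : s < lst.length := by omega
        have hgets : PySem.List.pyGetD lst (s : Int) 0 = lst.getD s 0 :=
          PySem.List.pyGetD_natCast ..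
        have hc : count + d.getD (PySem.List.pyGetD lst (s : Int) 0) 0
            = count + pvMC lst P s := by rw [hgets, hinv (lst.getD s 0)]; rfl
        by_cases hnext : (s : Int) + 1 < limit
        · have hsL : s + 1 < L := by omega
          have h1 : PySem.List.pyGetD lst ((s : Int) + 1) 0 = lst.getD (s + 1) 0 := by
            rw [show (s : Int) + 1 = ((s + 1 : Nat) : Int) by push_cast; ring,
              PySem.List.pyGetD_natCast]
          have h2 : PySem.List.pyGetD lst ((s : Int) + profesor + 1) 0
              = lst.getD (s + 1 + P) 0 := by
            rw [show (s : Int) + profesor + 1 = ((s + 1 + P : Nat) : Int) by push_cast; omega,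
              PySem.List.pyGetD_natCast]
          simp only [if_pos hnext, hc, h1, h2]
          rw [ih (s + 1) _ _ (by omega) (pvInv_step lst P s d hP (by omega) hinv)]
          simp [pvLoop, hbr]
        · have hm0 : m = 0 := by omega
          subst hm0
          simp only [if_neg hnext, hc]
          simp [pvLoop, hbr]

-- A as the abstract loop (main case)
theorem pvA_char (examen profesor : Int) (lst : List Int) (P : Nat)
    (hp : (P : Int) = profesor) (hP : 1 ≤ P) (hn : P + 1 ≤ lst.length) :
    profesor_check examen profesor lst
      = pvLoop examen 0 ((List.range' 0 (lst.length - P)).map (pvMC lst P)) := by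
  unfold profesor_check
  rw [PySem.List.pyRange_one, List.range_eq_range']
  have hfold : (fun (x : Int × Int × Bool) (y : Nat) => pvStepA examen lst x ((fun k : Nat => (0 : Int) + (k : Int)) y)) = pvGA examen lst := by
    funext x y; simp [pvGA]
  rw [List.foldl_map, hfold]
  have hK : ((lst.length : Int) - 1 - 0).toNat = lst.length - 1 := by omega
  rw [hK]
  set L := lst.length - P with hL
  rw [show List.range' 0 (lst.length - 1) = List.range' 0 L ++ List.range' (0 + 1 * L) (lst.length - 1 - L) by
    rw [List.range'_append]; congr 1; omega]
  rw [List.foldl_append, ← hp]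
  rw [pvA_head examen lst P hn L 0 0 (by omega)]
  rcases hflag : ((List.range' 0 L).foldl (pvGA examen lst) (0, (P : Int), false)).2.2 with _ | _
  · exact pvA_tail examen lst _ (0 + 1 * L) _ _ _ (Or.inr (by push_cast; omega))
  · exact pvA_tail examen lst _ (0 + 1 * L) _ _ _ (Or.inl rfl)

-- B as the abstract loop (main case)
theorem pvB_char (examen profesor : Int) (lst : List Int) (P : Nat)
    (hp : (P : Int) = profesor) (hP : 1 ≤ P) (hn : P + 1 ≤ lst.length) :
    profesor_check_alt examen profesor lst
      = pvLoop examen 0 ((List.range' 0 (lst.length - P)).map (pvMC lst P)) := by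
  unfold profesor_check_alt
  have hp0 : ¬ (profesor ≤ 0) := by omega
  have hlimval : min ((lst.length : Int) - 1) ((lst.length : Int) - profesor)
      = (lst.length : Int) - profesor := by apply min_eq_right; omega
  set L := lst.length - P with hL
  have hlim : (L : Int) = (lst.length : Int) - profesor := by push_cast [hL]; omega
  have hlim0 : ¬ ((lst.length : Int) - profesor ≤ 0) := by omega
  simp only [if_neg hp0, hlimval, if_neg hlim0]
  have hslice : PySem.List.slice lst (some 1) (some (1 + profesor))
      = (lst.drop 1).take P := by
    rw [show (1 : Int) = ((1 : Nat) : Int) by norm_num,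
      show ((1 : Nat) : Int) + profesor = ((1 : Nat) : Int) + (P : Int) by omega]
    exact PySem.List.slice_natCast_add lst 1 P
  have hinv0 : pvInv lst P 0 ((PySem.List.slice lst (some 1) (some (1 + profesor))).foldl
      (fun d x => d.insert x (d.getD x 0 + 1)) PySem.Dict.empty) := by
    intro v
    rw [hslice, PySem.Dict.getD_foldl_insert_add_one]
    simp
  rw [← hlim, PySem.List.pyRange_one, List.range_eq_range']
  have hfold : (fun (x : Int × PySem.Dict Int Int × Bool) (y : Nat) =>
      pvStepB examen profesor ((lst.length : Int) - profesor) lst x ((fun k : Nat => (0 : Int) + (k : Int)) y))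
      = pvGB examen profesor ((lst.length : Int) - profesor) lst := by
    funext x y; simp [pvGB]
  rw [List.foldl_map]
  rw [show ((L : Int) - 0).toNat = L by omega]
  rw [← hlim] at hfold
  rw [hfold]
  exact pvB_head examen profesor (L : Int) lst P L hp rfl hL hP hn L 0 0 _ (by omega) hinv0

-- degenerate case: profesor ≤ 0, A never counts
theorem pvA_nonpos (examen profesor : Int) (lst : List Int) (hp : profesor ≤ 0) :
    ∀ (len s : Nat) (b : Bool), s + len ≤ lst.length - 1 →
    ((List.range' s len).foldl (pvGA examen lst) (0, profesor, b)).1 = 0 := by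
  intro len
  induction len with
  | zero => intro s b _; rfl
  | succ m ih =>
      intro s b hs
      rw [List.range'_succ, List.foldl_cons]
      rcases b with _ | _
      · have hcond : ((lst.length : Int) - (s : Int) > profesor) := by
          have : s + 1 ≤ lst.length - 1 := by omega
          omega
        by_cases hbr : (0 : Int) = examen - 1
        · simp only [pvGA, pvStepA, Bool.false_eq_true, if_false, hcond, if_true, if_pos hbr]
          exact ih (s + 1) true (by omega)
        · have hfuel : profesor.toNat = 0 := by omega
          simp only [pvGA, pvStepA, Bool.false_eq_true, if_false, hcond, if_true, if_neg hbr,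
            hfuel]
          simpa [pvWhileA] using ih (s + 1) false (by omega)
      · simp only [pvGA, pvStepA, if_true]
        exact ih (s + 1) true (by omega)

-- ===== VERDICT (by name: the statement is the Claim_ definition above) =====
theorem profesor_check_spec : Claim_equal_profesor_check := by
  intro examen profesor lst _
  unfold Spec_profesor_check
  by_cases hp : profesor ≤ 0
  · -- A: window never matches anything; B: early return 0
    have hB : profesor_check_alt examen profesor lst = 0 := by
      unfold profesor_check_alt; simp [hp]
    rw [hB]
    unfold profesor_check
    rw [PySem.List.pyRange_one, List.range_eq_range']
    have hfold : (fun (x : Int × Int × Bool) (y : Nat) => pvStepA examen lst x ((fun k : Nat => (0 : Int) + (k : Int)) y)) = pvGA examen lst := by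
      funext x y; simp [pvGA]
    rw [List.foldl_map, hfold]
    exact pvA_nonpos examen profesor lst hp _ 0 false (by omega)
  · set P := profesor.toNat with hP
    have hpc : (P : Int) = profesor := Int.toNat_of_nonneg (by omega)
    by_cases hn : P + 1 ≤ lst.length
    · rw [pvA_char examen profesor lst P hpc (by omega) hn,
        pvB_char examen profesor lst P hpc (by omega) hn]
    · -- lst.length ≤ profesor: A's else branch fires from the start, B stops at the limit check
      have hB : profesor_check_alt examen profesor lst = 0 := by
        unfold profesor_check_alt
        have h2 : min ((lst.length : Int) - 1) ((lst.length : Int) - profesor) ≤ 0 := by omega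
        simp [hp, h2]
      rw [hB]
      unfold profesor_check
      rw [PySem.List.pyRange_one, List.range_eq_range']
      have hfold : (fun (x : Int × Int × Bool) (y : Nat) => pvStepA examen lst x ((fun k : Nat => (0 : Int) + (k : Int)) y)) = pvGA examen lst := by
        funext x y; simp [pvGA]
      rw [List.foldl_map, hfold]
      exact pvA_tail examen lst _ 0 0 profesor false (Or.inr (by push_cast; omega))
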